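-- pv_equiv track=rewrite | github.com/Goddohi/coding_algorithm | 프로그래머스/0/120843. 공 던지기/공 던지기.py | solution
-- ===== SOURCE A (Python) =====
-- def solution(numbers, k):
--     j,i=0,1
--     le = len(numbers);
--     while (i !=k):
--         i +=1
--         j +=2
--         if(j>=le):
--             j=j-le
--
--     return numbers[j];
-- ===== SOURCE B (Python) =====
-- def solution(numbers, k):
--     return numbers[(2 * (k - 1)) % len(numbers)]
-- ===== Notes on version B (the rewrite author's own statement) =====
-- stated objective: faster
-- what changed: replaces the O(k) step-by-step index loop with the closed-form index (2*(k-1)) % len(numbers)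
-- outside the precondition, e.g. on solution([1, 2, 3], 0): A does not finish within the time limit, B returns 2; on solution([5], 2): A raises IndexError, B returns 5
import Mathlib
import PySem

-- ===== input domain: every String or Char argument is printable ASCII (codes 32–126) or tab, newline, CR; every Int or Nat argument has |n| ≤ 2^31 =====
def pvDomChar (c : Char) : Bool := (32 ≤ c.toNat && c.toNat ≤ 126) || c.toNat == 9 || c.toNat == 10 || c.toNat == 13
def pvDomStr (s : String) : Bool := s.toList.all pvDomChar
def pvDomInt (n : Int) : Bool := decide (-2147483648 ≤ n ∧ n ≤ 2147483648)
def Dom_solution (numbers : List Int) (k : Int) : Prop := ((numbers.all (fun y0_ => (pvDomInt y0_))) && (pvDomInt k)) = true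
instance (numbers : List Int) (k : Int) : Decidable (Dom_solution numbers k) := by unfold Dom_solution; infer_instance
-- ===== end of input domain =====

-- B replaces A's O(k) step-by-step index loop by the closed-form index (2*(k-1)) % len(numbers).

-- ===== PORT A =====
-- the while loop: runs while i != k; for k ≥ 1 that is exactly (k-1) iterations (fuel);
-- for k < 1 the Python loop diverges (excluded by Pre_).
def solutionLoopA (le : Int) : Nat → Int → Int
  | 0, j => j
  | n + 1, j =>
    let j2 := j + 2
    solutionLoopA le n (if j2 ≥ le then j2 - le else j2)

def solution (numbers : List Int) (k : Int) : Int :=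
  -- numbers[j] after the loop; Pre_ guarantees the index is in range (IndexError excluded)
  (PySem.List.pyGet? numbers (solutionLoopA (numbers.length : Int) (k - 1).toNat 0)).getD 0

-- ===== PORT B =====
def solution_alt (numbers : List Int) (k : Int) : Int :=
  -- numbers[(2*(k-1)) % len(numbers)]; Pre_ guarantees numbers ≠ [] and the index in range
  (PySem.List.pyGet? numbers (PySem.Int.mod (2 * (k - 1)) numbers.length)).getD 0

-- ===== PRECONDITION & SPEC =====
-- Pre_ excludes exactly the inputs on which A does not return: k < 1 (the while loop never
-- terminates), numbers = [] (IndexError), and len(numbers) = 1 with k ≥ 2 (A's single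
-- subtraction fails to wrap the index, so numbers[j] raises IndexError).
def Pre_solution (numbers : List Int) (k : Int) : Prop :=
  1 ≤ k ∧ (2 ≤ numbers.length ∨ (k = 1 ∧ numbers.length = 1))
instance (numbers : List Int) (k : Int) : Decidable (Pre_solution numbers k) := by
  unfold Pre_solution; infer_instance

def pvWitness_solution : List Int × Int := ([10, 20, 30], 4)

def Spec_solution (numbers : List Int) (k : Int) (out : Int) : Prop := out = solution_alt numbers k
instance (numbers : List Int) (k : Int) (out : Int) : Decidable (Spec_solution numbers k out) := by
  unfold Spec_solution; infer_instance

-- ===== CLAIM (what is proved, stated in full; the proofs are below) =====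
def Claim_equal_solution : Prop := ∀ (numbers : List Int) (k : Int),
  Dom_solution numbers k → Pre_solution numbers k → Spec_solution numbers k (solution numbers k)

-- ===== LEMMAS AND PROOFS =====

-- loop invariant: for le ≥ 2 and 0 ≤ j < le, n steps of "+2 with a single wrap" is +2n mod le
theorem solutionLoopA_eq (le : Int) (hle : 2 ≤ le) :
    ∀ (n : Nat) (j : Int), 0 ≤ j → j < le → solutionLoopA le n j = (j + 2 * n) % le := by
  intro n
  induction n with
  | zero =>
    intro j h0 h1
    simp only [solutionLoopA, Nat.cast_zero, mul_zero, add_zero]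
    exact (Int.emod_eq_of_lt h0 h1).symm
  | succ n ih =>
    intro j h0 h1
    simp only [solutionLoopA]
    by_cases h : j + 2 ≥ le
    · simp only [if_pos h]
      rw [ih (j + 2 - le) (by omega) (by omega)]
      have : (j + 2 - le + 2 * (n : Int)) % le = (j + 2 * ((n : Nat) + 1 : Nat)) % le := by
        rw [show (j + 2 - le + 2 * n : Int) = (j + 2 * ((n : Nat) + 1 : Nat)) + (-1) * le by push_cast; ring,
          Int.add_mul_emod_self_right]
      rw [this]
    · simp only [if_neg h]
      rw [ih (j + 2) (by omega) (by omega)]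
      congr 1
      push_cast; ring

-- ===== VERDICT (by name: the statement is the Claim_ definition above) =====
theorem solution_spec : Claim_equal_solution := by
  intro numbers k _ hpre
  obtain ⟨hk, hcase⟩ := hpre
  unfold Spec_solution solution solution_alt
  by_cases hk1 : k = 1
  · subst hk1
    simp [solutionLoopA, PySem.Int.mod_eq_emod_of_pos (b := (numbers.length : Int)) (by
      rcases hcase with h | h <;> omega)]
  · have hle : 2 ≤ (numbers.length : Int) := by rcases hcase with h | h <;> omega
    have hfuel : ((k - 1).toNat : Int) = k - 1 := by omega
    rw [solutionLoopA_eq (numbers.length : Int) hle (k - 1).toNat 0 le_rfl (by omega)]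
    rw [PySem.Int.mod_eq_emod_of_pos (by omega)]
    congr 2
    rw [hfuel]; ring_nf
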